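-- pv_equiv track=rewrite | github.com/Askwitionary/processing | src/scripts/data_structure/graph/graph.py | gen_vertices_
-- ===== SOURCE A (Python) =====
-- import string
--
-- def gen_vertices_(count: int):
--     """
--     generate a list of vertices
--     :param count: number of vertices to generate
--     :return:
--     """
--
--     if type(count) is not int:
--         if type(count) is float:
--             if int(count) == count:
--                 count = int(count)
--             else:
--                 raise TypeError("Not supported type '{}' for function gen_vertices. "
--                                 "Input should be 'int'.".format(type(count)))
--         else:
--             raise TypeError("Not supported type '{}' for function gen_vertices. "
--                             "Input should be 'int'.".format(type(count)))
--
--     letters = string.ascii_uppercase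
--     if count <= len(letters):
--         return [letters[i] for i in range(count)]
--     else:
--         if count > 26 + 26 ** 2 + 26 ** 3 + 26 ** 4 + 26 ** 5:
--             raise ValueError("Too BIG!")
--         output = [name for name in letters]
--         count = count - len(letters)
--         for first in letters:
--             for second in letters:
--                 output.append(first + second)
--                 count -= 1
--                 if count == 0:
--                     return output
--         for first in letters:
--             for second in letters:
--                 for third in letters:
--                     output.append(first + second + third)
--                     count -= 1
--                     if count == 0:
--                         return output
--         for first in letters:
--             for second in letters:
--                 for third in letters:
--                     for forth in letters:
--                         output.append(first + second + third + forth)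
--                         count -= 1
--                         if count == 0:
--                             return output
--         for first in letters:
--             for second in letters:
--                 for third in letters:
--                     for forth in letters:
--                         for fifth in letters:
--                             output.append(first + second + third + forth + fifth)
--                             count -= 1
--                             if count == 0:
--                                 return output
-- ===== SOURCE B (Python) =====
-- import string
--
-- def gen_vertices_(count: int):
--     """
--     generate a list of vertices
--     :param count: number of vertices to generate
--     :return:
--     """
--     if type(count) is not int:
--         if type(count) is float and int(count) == count:
--             count = int(count)
--         else:
--             raise TypeError("Not supported type '{}' for function gen_vertices. "
--                             "Input should be 'int'.".format(type(count)))
--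
--     if count > 26 + 26 ** 2 + 26 ** 3 + 26 ** 4 + 26 ** 5:
--         raise ValueError("Too BIG!")
--
--     letters = string.ascii_uppercase
--     output = []
--     for i in range(count):
--         # find the tier (name width) this index falls in
--         off, size, width = i, 26, 1
--         while off >= size:
--             off -= size
--             size *= 26
--             width += 1
--         # render off as a fixed-width base-26 string, most significant first
--         name = ""
--         for _ in range(width):
--             off, d = divmod(off, 26)
--             name = letters[d] + name
--         output.append(name)
--     return output
-- ===== Notes on version B (the rewrite author's own statement) =====
-- stated objective: alternative
-- what changed: Replaces A's four levels of nested letter loops that append names while counting down by a single pass that computes each vertex name directly from its index (tier search by subtracting successive tier sizes, then fixed-width base-26 rendering).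
import Mathlib
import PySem

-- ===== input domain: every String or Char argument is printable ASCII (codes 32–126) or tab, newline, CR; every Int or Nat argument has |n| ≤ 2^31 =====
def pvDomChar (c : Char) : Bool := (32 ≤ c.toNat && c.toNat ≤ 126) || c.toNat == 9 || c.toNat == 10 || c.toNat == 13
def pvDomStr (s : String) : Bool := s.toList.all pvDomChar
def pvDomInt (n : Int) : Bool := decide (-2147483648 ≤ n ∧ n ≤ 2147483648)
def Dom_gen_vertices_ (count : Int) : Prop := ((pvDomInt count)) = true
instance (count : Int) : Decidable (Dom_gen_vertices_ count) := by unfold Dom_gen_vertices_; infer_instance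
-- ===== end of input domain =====

-- B replaces A's four levels of nested name-building loops by a direct per-index
-- closed-form rendering (tier search + fixed-width base-26 digits); objective: alternative.
-- The float/int type coercion and TypeError of the Python originals are outside the Int-typed ports.

-- ===== PORT A =====

-- string.ascii_uppercase, indexed as single-character strings
def pvLetters : List String :=
  ["A","B","C","D","E","F","G","H","I","J","K","L","M",
   "N","O","P","Q","R","S","T","U","V","W","X","Y","Z"]

-- one body step of A's name loops: append the name, decrement count, early-return (inr) at 0
def pvStep (st : (List String × Int) ⊕ (List String)) (name : String) :
    (List String × Int) ⊕ (List String) :=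
  match st with
  | .inr r => .inr r
  | .inl (out, c) =>
    let out' := out ++ [name]
    let c' := c - 1
    if c' = 0 then .inr out' else .inl (out', c')

-- the name sequences A's nested loops run through, in loop order
def pvT2 : List String := pvLetters.flatMap (fun a => pvLetters.map (fun b => a ++ b))
def pvT3 : List String :=
  pvLetters.flatMap (fun a => pvLetters.flatMap (fun b => pvLetters.map (fun c => a ++ b ++ c)))
def pvT4 : List String :=
  pvLetters.flatMap (fun a => pvLetters.flatMap (fun b =>
    pvLetters.flatMap (fun c => pvLetters.map (fun d => a ++ b ++ c ++ d))))
def pvT5 : List String :=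
  pvLetters.flatMap (fun a => pvLetters.flatMap (fun b =>
    pvLetters.flatMap (fun c => pvLetters.flatMap (fun d =>
      pvLetters.map (fun e => a ++ b ++ c ++ d ++ e)))))

def gen_vertices_ (count : Int) : List String :=
  if count ≤ 26 then
    (PySem.List.pyRange 0 count 1).map (fun i => PySem.List.pyGetD pvLetters i "")
  else if count > 26 + 26 ^ 2 + 26 ^ 3 + 26 ^ 4 + 26 ^ 5 then
    []  -- Python raises ValueError "Too BIG!" here; excluded by Pre_
  else
    match List.foldl pvStep (List.foldl pvStep (List.foldl pvStep
        (List.foldl pvStep (.inl (pvLetters, count - 26)) pvT2) pvT3) pvT4) pvT5 with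
    | .inr r => r
    | .inl (out, _) => out  -- Python falls off the loops only when count > the bound, excluded above

-- ===== PORT B =====

-- the `while off >= size` tier search of Source B (0 < size is a totality guard; size starts at 26)
def pvTier (off size width : Nat) : Nat × Nat :=
  if h : 0 < size ∧ size ≤ off then
    pvTier (off - size) (size * 26) (width + 1)
  else (off, width)
termination_by off
decreasing_by omega

-- the `for _ in range(width)` digit loop of Source B: prepend letters[off % 26], shift off
def pvDigits : Nat → Nat → String → String
  | 0, _, s => s
  | w + 1, off, s => pvDigits w (off / 26) (pvLetters.getD (off % 26) "" ++ s)

def pvName (i : Nat) : String :=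
  pvDigits (pvTier i 26 1).2 (pvTier i 26 1).1 ""

def gen_vertices__alt (count : Int) : List String :=
  if count > 26 + 26 ^ 2 + 26 ^ 3 + 26 ^ 4 + 26 ^ 5 then
    []  -- Python raises ValueError "Too BIG!" here; excluded by Pre_
  else
    -- i ranges over 0..count-1, always nonnegative, so .toNat is exact
    (PySem.List.pyRange 0 count 1).map (fun i => pvName i.toNat)

-- ===== PRECONDITION & SPEC =====
-- Pre_ excludes exactly the counts above 26+26^2+26^3+26^4+26^5, on which Python A raises ValueError "Too BIG!".
def Pre_gen_vertices_ (count : Int) : Prop := count ≤ 26 + 26 ^ 2 + 26 ^ 3 + 26 ^ 4 + 26 ^ 5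
instance (count : Int) : Decidable (Pre_gen_vertices_ count) := by unfold Pre_gen_vertices_; infer_instance
def pvWitness_gen_vertices_ : Int := 30

def Spec_gen_vertices_ (count : Int) (out : List String) : Prop := out = gen_vertices__alt count
instance (count : Int) (out : List String) : Decidable (Spec_gen_vertices_ count out) := by unfold Spec_gen_vertices_; infer_instance

-- ===== CLAIM (what is proved, stated in full; the proofs are below) =====
def Claim_equal_gen_vertices_ : Prop := ∀ (count : Int), Dom_gen_vertices_ count → Pre_gen_vertices_ count → Spec_gen_vertices_ count (gen_vertices_ count)

-- ===== LEMMAS AND PROOFS =====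

-- W n = all n-letter uppercase names in lexicographic order
def pvW : Nat → List String
  | 0 => [""]
  | n + 1 => (pvW n).flatMap (fun p => pvLetters.map (fun b => p ++ b))

theorem pvW_length (n : Nat) : (pvW n).length = 26 ^ n := by
  induction n with
  | zero => rfl
  | succ n ih =>
    simp [pvW, List.length_flatMap, List.map_const', ih, pvLetters]
    ring

theorem pvW_one : pvW 1 = pvLetters := by
  simp [pvW, List.flatMap]

theorem pvT2_eq : pvT2 = pvW 2 := by
  simp [pvT2, pvW]

theorem pvT3_eq : pvT3 = pvW 3 := by
  simp [pvT3, pvW, List.flatMap_assoc, List.flatMap_map, String.append_assoc]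

theorem pvT4_eq : pvT4 = pvW 4 := by
  simp [pvT4, pvW, List.flatMap_assoc, List.flatMap_map, String.append_assoc]

theorem pvT5_eq : pvT5 = pvW 5 := by
  simp [pvT5, pvW, List.flatMap_assoc, List.flatMap_map, String.append_assoc]

-- the full name sequence
def pvAll : List String := pvW 1 ++ (pvW 2 ++ (pvW 3 ++ (pvW 4 ++ pvW 5)))

-- A's fold with early exit: inr is absorbing
theorem foldl_pvStep_inr (L : List String) (r : List String) :
    List.foldl pvStep (.inr r) L = .inr r := by
  induction L with
  | nil => rfl
  | cons x L ih => simpa [pvStep] using ih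

theorem foldl_pvStep_inl (L : List String) (out : List String) (c : Int) (h1 : 1 ≤ c) :
    List.foldl pvStep (.inl (out, c)) L =
      if c ≤ L.length then .inr (out ++ L.take c.toNat)
      else .inl (out ++ L, c - L.length) := by
  induction L generalizing out c with
  | nil =>
    simp only [List.foldl_nil, List.length_nil]
    rw [if_neg (by omega)]
    simp
  | cons x L ih =>
    simp only [List.foldl_cons, pvStep, List.length_cons]
    by_cases hc : c - 1 = 0
    · have hc1 : c = 1 := by omega
      subst hc1
      rw [if_pos hc, foldl_pvStep_inr, if_pos (by push_cast; omega)]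
      norm_num
    · rw [if_neg hc, ih (out ++ [x]) (c - 1) (by omega)]
      by_cases hle : c - 1 ≤ (L.length : Int)
      · rw [if_pos hle, if_pos (by push_cast; omega)]
        have htn : c.toNat = (c - 1).toNat + 1 := by omega
        rw [htn, List.take_succ_cons]
        simp
      · rw [if_neg hle, if_neg (by push_cast; omega)]
        simp only [Sum.inl.injEq, Prod.mk.injEq, List.append_assoc, List.singleton_append]
        exact ⟨trivial, by push_cast; ring⟩

-- getD through one flatMap level: block decomposition of the index
theorem getD_block (L : List String) (off : Nat) (h : off < 26 * L.length) :
    (L.flatMap (fun p => pvLetters.map (fun b => p ++ b))).getD off "" =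
      L.getD (off / 26) "" ++ pvLetters.getD (off % 26) "" := by
  induction L generalizing off with
  | nil => simp at h
  | cons p L ih =>
    simp only [List.flatMap_cons]
    by_cases h26 : off < 26
    · rw [List.getD_append _ _ _ _ (by simp [pvLetters]; omega)]
      have hd : off / 26 = 0 := Nat.div_eq_of_lt h26
      have hm : off % 26 = off := Nat.mod_eq_of_lt h26
      rw [hd, hm]
      simp only [List.getD_cons_zero]
      rw [List.getD_eq_getElem _ _ (by simp [pvLetters]; omega),
          List.getD_eq_getElem _ _ (by simp [pvLetters]; omega)]
      simp
    · have hlen : (pvLetters.map (fun b => p ++ b)).length = 26 := by simp [pvLetters]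
      rw [List.getD_append_right _ _ _ _ (by omega)]
      rw [hlen]
      have hrec := ih (off - 26) (by simp at h; omega)
      rw [hrec]
      have h1 : off / 26 = (off - 26) / 26 + 1 := by omega
      have h2 : off % 26 = (off - 26) % 26 := by omega
      rw [h1, h2, List.getD_cons_succ]

-- Source B's digit loop renders exactly the off-th name of width n (with s appended)
theorem pvDigits_eq (n : Nat) : ∀ (off : Nat) (s : String), off < 26 ^ n →
    pvDigits n off s = (pvW n).getD off "" ++ s := by
  induction n with
  | zero =>
    intro off s h
    interval_cases off
    simp [pvDigits, pvW]
  | succ n ih =>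
    intro off s h
    have hdiv : off / 26 < 26 ^ n := by
      rw [Nat.div_lt_iff_lt_mul (by omega)]
      calc off < 26 ^ (n + 1) := h
        _ = 26 ^ n * 26 := by ring
    rw [pvDigits, ih _ _ hdiv]
    have hb : off < 26 * (pvW n).length := by rw [pvW_length]; omega
    rw [show pvW (n + 1) = (pvW n).flatMap (fun p => pvLetters.map (fun b => p ++ b)) from rfl,
        getD_block _ _ hb, String.append_assoc]

theorem pvTier_stop (off size width : Nat) (h : ¬ (0 < size ∧ size ≤ off)) :
    pvTier off size width = (off, width) := by
  rw [pvTier]; simp [h]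

theorem pvTier_step (off size width : Nat) (h : 0 < size ∧ size ≤ off) :
    pvTier off size width = pvTier (off - size) (size * 26) (width + 1) := by
  rw [pvTier]; simp [h]

-- take through an append whose left part is fully taken
theorem take_append_full (A B : List String) (n : Nat) (h : A.length ≤ n) :
    (A ++ B).take n = A ++ B.take (n - A.length) := by
  rw [List.take_append, List.take_of_length_le h]

-- getD through an append, split by the left length
theorem getD_append_split (A B : List String) (i : Nat) :
    (A ++ B).getD i "" = if i < A.length then A.getD i "" else B.getD (i - A.length) "" := by
  by_cases h : i < A.length
  · rw [if_pos h, List.getD_append _ _ _ _ h]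
  · rw [if_neg h, List.getD_append_right _ _ _ _ (by omega)]

-- B's per-index name is the i-th element of the full sequence
theorem pvName_eq (i : Nat) (h : i < 12356630) : pvName i = pvAll.getD i "" := by
  have l1 : (pvW 1).length = 26 := by rw [pvW_length]; norm_num
  have l2 : (pvW 2).length = 676 := by rw [pvW_length]; norm_num
  have l3 : (pvW 3).length = 17576 := by rw [pvW_length]; norm_num
  have l4 : (pvW 4).length = 456976 := by rw [pvW_length]; norm_num
  have l5 : (pvW 5).length = 11881376 := by rw [pvW_length]; norm_num
  unfold pvName pvAll
  rw [getD_append_split, l1]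
  by_cases h1 : i < 26
  · rw [if_pos h1, pvTier_stop _ _ _ (by omega)]
    have := pvDigits_eq 1 i "" (by simpa using h1)
    simpa [pvW_one] using this
  rw [if_neg (by omega), getD_append_split, l2]
  rw [pvTier_step _ _ _ (by omega)]
  by_cases h2 : i < 26 + 676
  · rw [if_pos (by omega), pvTier_stop _ _ _ (by omega)]
    have := pvDigits_eq 2 (i - 26) "" (by norm_num; omega)
    simpa using this
  rw [if_neg (by omega), getD_append_split, l3]
  rw [pvTier_step _ _ _ (by omega)]
  by_cases h3 : i < 26 + 676 + 17576
  · rw [if_pos (by omega), pvTier_stop _ _ _ (by omega)]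
    have := pvDigits_eq 3 (i - 26 - 676) "" (by norm_num; omega)
    have e : i - 26 - 676 = i - 26 - 676 := rfl
    simpa [Nat.sub_sub] using this
  rw [if_neg (by omega), getD_append_split, l4]
  rw [pvTier_step _ _ _ (by omega)]
  by_cases h4 : i < 26 + 676 + 17576 + 456976
  · rw [if_pos (by omega), pvTier_stop _ _ _ (by omega)]
    have := pvDigits_eq 4 (i - 26 - 676 - 17576) "" (by norm_num; omega)
    simpa [Nat.sub_sub] using this
  · rw [if_neg (by omega), pvTier_step _ _ _ (by omega),
        pvTier_stop _ _ _ (by omega)]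
    have := pvDigits_eq 5 (i - 26 - 676 - 17576 - 456976) "" (by norm_num; omega)
    simpa [Nat.sub_sub] using this

-- mapping getD over an initial range is take
theorem map_range_getD (xs : List String) (m : Nat) (h : m ≤ xs.length) :
    (List.range m).map (fun k => xs.getD k "") = xs.take m := by
  induction m with
  | zero => simp
  | succ m ih =>
    have hm : m < xs.length := by omega
    rw [List.range_succ, List.map_append, ih (by omega), List.take_succ]
    simp [List.getD, List.getElem?_eq_getElem hm]

-- B computes the take of the full sequence
theorem alt_eq_take (count : Int) (hpre : count ≤ 12356630) :
    gen_vertices__alt count = pvAll.take count.toNat := by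
  have hall : pvAll.length = 12356630 := by
    simp [pvAll, pvW_length]
  unfold gen_vertices__alt
  rw [if_neg (by norm_num; omega)]
  rw [PySem.List.pyRange_one]
  simp only [Int.sub_zero, List.map_map]
  have : ∀ k ∈ List.range count.toNat,
      ((fun i => pvName i.toNat) ∘ fun (k : Nat) => (0 : Int) + k) k = (fun k => pvAll.getD k "") k := by
    intro k hk
    simp only [List.mem_range] at hk
    simp only [Function.comp]
    have : ((0 : Int) + (k : Int)).toNat = k := by omega
    rw [this, pvName_eq k (by omega)]
  rw [List.map_congr_left this, map_range_getD _ _ (by omega)]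

-- A computes the same take of the full sequence
theorem a_eq_take (count : Int) (hpre : count ≤ 12356630) :
    gen_vertices_ count = pvAll.take count.toNat := by
  unfold gen_vertices_
  by_cases h26 : count ≤ 26
  · rw [if_pos h26, PySem.List.pyRange_one]
    simp only [Int.sub_zero, List.map_map]
    have hstep : ∀ k ∈ List.range count.toNat,
        ((fun i => PySem.List.pyGetD pvLetters i "") ∘ fun (k : Nat) => (0 : Int) + k) k
          = (fun k => pvLetters.getD k "") k := by
      intro k hk
      simp [PySem.List.pyGetD_natCast]
    rw [List.map_congr_left hstep, map_range_getD _ _ (by simp [pvLetters]; omega)]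
    unfold pvAll
    rw [List.take_append_of_le_length (by rw [pvW_one]; simp [pvLetters]; omega), pvW_one]
  · rw [if_neg h26, if_neg (by norm_num; omega)]
    have hrlen : (pvW 2 ++ (pvW 3 ++ (pvW 4 ++ pvW 5))).length = 12356604 := by
      simp [pvW_length]
    rw [pvT2_eq, pvT3_eq, pvT4_eq, pvT5_eq,
        ← List.foldl_append, ← List.foldl_append, ← List.foldl_append]
    rw [foldl_pvStep_inl _ _ _ (by omega)]
    rw [if_pos (by rw [hrlen]; omega)]
    show pvLetters ++ _ = _
    unfold pvAll
    have hll : pvLetters.length = 26 := by decide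
    have htn : (count - 26).toNat = count.toNat - pvLetters.length := by rw [hll]; omega
    conv_rhs => rw [pvW_one, take_append_full _ _ _ (by rw [hll]; omega)]
    rw [htn]

-- ===== VERDICT (by name: the statement is the Claim_ definition above) =====
theorem gen_vertices__spec : Claim_equal_gen_vertices_ := by
  intro count _ hpre
  unfold Spec_gen_vertices_
  have hpre' : count ≤ 12356630 := by unfold Pre_gen_vertices_ at hpre; norm_num at hpre; omega
  rw [a_eq_take count hpre', alt_eq_take count hpre']
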